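-- pv_equiv track=rewrite | github.com/billycemerson/LightGCN-Rec-Running-Shoes | src/evaluator.py | compute_normalized_ranks
-- ===== SOURCE A (Python) =====
-- def compute_normalized_ranks(train, test, recommended):
--     """Compute ranks and remove found items to simulate ideal top-N ranking"""
--     train = set(train)
--     recommended = [item for item in recommended if item not in train]
--     ranks = []
--     for item in test:
--         try:
--             rank = recommended.index(item) + 1
--             recommended.pop(rank - 1)
--         except (ValueError, IndexError):
--             rank = None
--         ranks.append(rank)
--     return ranks
-- ===== SOURCE B (Python) =====
-- def compute_normalized_ranks(train, test, recommended):
--     """Compute ranks and remove found items to simulate ideal top-N ranking"""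
--     banned = set(train)
--     # one pass: map each surviving item to the queue of its positions in the
--     # filtered recommendation list (the list itself is never materialized)
--     occ = {}
--     n = 0
--     for item in recommended:
--         if item not in banned:
--             occ.setdefault(item, []).append(n)
--             n += 1
--     dead = []   # sorted list of already-consumed positions
--     ranks = []
--     for item in test:
--         positions = occ.get(item)
--         if not positions:
--             ranks.append(None)
--             continue
--         p = positions.pop(0)
--         # rank of p among still-alive positions: binary search in dead
--         lo, hi = 0, len(dead)
--         while lo < hi:
--             mid = (lo + hi) // 2
--             if dead[mid] < p:
--                 lo = mid + 1
--             else: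
--                 hi = mid
--         dead.insert(lo, p)
--         ranks.append(p + 1 - lo)
--     return ranks
-- ===== Notes on version B (the rewrite author's own statement) =====
-- stated objective: faster
-- what changed: Instead of repeatedly scanning and popping the shrinking recommendation list (list.index + list.pop per test item), B builds in one pass a dict mapping each surviving item to the queue of its positions in the filtered list, and keeps a sorted list of consumed positions; each rank is then position+1 minus a binary-searched count of consumed positions below it.
import Mathlib
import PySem

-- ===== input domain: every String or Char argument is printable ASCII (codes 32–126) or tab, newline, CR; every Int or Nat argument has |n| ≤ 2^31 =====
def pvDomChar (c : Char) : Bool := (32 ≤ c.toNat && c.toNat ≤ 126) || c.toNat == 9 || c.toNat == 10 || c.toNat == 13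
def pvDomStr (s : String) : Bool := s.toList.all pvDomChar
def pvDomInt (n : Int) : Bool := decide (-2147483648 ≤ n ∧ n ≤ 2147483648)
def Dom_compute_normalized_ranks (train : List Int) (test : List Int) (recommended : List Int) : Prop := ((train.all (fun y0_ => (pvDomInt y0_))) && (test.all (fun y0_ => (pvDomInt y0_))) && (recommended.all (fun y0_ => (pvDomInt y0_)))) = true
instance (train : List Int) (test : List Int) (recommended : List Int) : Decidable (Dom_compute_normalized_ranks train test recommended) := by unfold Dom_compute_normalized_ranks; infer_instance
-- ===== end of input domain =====

-- B replaces A's repeated index+pop scans of the shrinking recommendation list by a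
-- one-pass item→positions index plus a sorted list of consumed positions (binary search);
-- objective: faster. Return-value equivalence only (neither version mutates its arguments).

-- ===== PORT A =====
def stepA (st : List Int × List (Option Int)) (item : Int) : List Int × List (Option Int) :=
  match PySem.List.index? st.1 item with
  | some i =>
    let rank : Int := (i : Int) + 1
    match PySem.List.pop? st.1 (rank - 1) with
    | some pr => (pr.2, st.2 ++ [some rank])
    | none => (st.1, st.2 ++ [none])      -- IndexError → rank = None
  | none => (st.1, st.2 ++ [none])        -- ValueError → rank = None

def compute_normalized_ranks (train : List Int) (test : List Int) (recommended : List Int) : List (Option Int) :=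
  let trainS := PySem.Set.ofList train
  let rec0 := recommended.filter (fun item => !(PySem.Set.contains trainS item))
  (test.foldl stepA (rec0, [])).2

-- ===== PORT B =====
-- the while lo < hi binary-search loop of Source B
def bsCount (dead : List Nat) (p : Nat) (lo hi : Nat) : Nat :=
  if _h : lo < hi then
    let mid := (lo + hi) / 2
    if dead.getD mid 0 < p then bsCount dead p (mid + 1) hi
    else bsCount dead p lo mid
  else lo
termination_by hi - lo
decreasing_by all_goals omega

-- the first loop of Source B: occ.setdefault(item, []).append(n); n += 1
def buildStep (banned : PySem.Set Int) (st : PySem.Dict Int (List Nat) × Nat) (item : Int) :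
    PySem.Dict Int (List Nat) × Nat :=
  if !(PySem.Set.contains banned item) then
    (PySem.Dict.modify st.1 item [] (fun l => l ++ [st.2]), st.2 + 1)
  else st

-- the second loop of Source B (positions.pop(0) mutates the dict's value: modelled by insert)
def stepB (st : PySem.Dict Int (List Nat) × List Nat × List (Option Int)) (item : Int) :
    PySem.Dict Int (List Nat) × List Nat × List (Option Int) :=
  match PySem.Dict.getD st.1 item [] with
  | [] => (st.1, st.2.1, st.2.2 ++ [none])
  | p :: rest =>
    let lo := bsCount st.2.1 p 0 st.2.1.length
    (PySem.Dict.insert st.1 item rest,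
     PySem.List.insert st.2.1 (lo : Int) p,
     st.2.2 ++ [some ((p : Int) + 1 - (lo : Int))])

def compute_normalized_ranks_alt (train : List Int) (test : List Int) (recommended : List Int) : List (Option Int) :=
  let banned := PySem.Set.ofList train
  let built := recommended.foldl (buildStep banned) (PySem.Dict.empty, 0)
  (test.foldl stepB (built.1, [], [])).2.2

-- ===== PRECONDITION & SPEC =====
def Spec_compute_normalized_ranks (train : List Int) (test : List Int) (recommended : List Int) (out : List (Option Int)) : Prop := out = compute_normalized_ranks_alt train test recommended
instance (train : List Int) (test : List Int) (recommended : List Int) (out : List (Option Int)) : Decidable (Spec_compute_normalized_ranks train test recommended out) := by unfold Spec_compute_normalized_ranks; infer_instance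

-- ===== CLAIM (what is proved, stated in full; the proofs are below) =====
def Claim_equal_compute_normalized_ranks : Prop := ∀ (train : List Int) (test : List Int) (recommended : List Int), Dom_compute_normalized_ranks train test recommended → Spec_compute_normalized_ranks train test recommended (compute_normalized_ranks train test recommended)

-- ===== LEMMAS AND PROOFS =====


lemma cnt_lt (l : List Nat) (p : Nat) :
    l.Pairwise (· < ·) →
    ∀ i (h : i < l.length), (l[i] < p ↔ i < l.countP (fun d => decide (d < p))) := by
  induction l with
  | nil => intro _ i h; simp at h
  | cons a t ih =>
    intro hl i h
    obtain ⟨ha, ht⟩ := List.pairwise_cons.mp hl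
    have hz : ¬ a < p → t.countP (fun d => decide (d < p)) = 0 := by
      intro hap
      rw [List.countP_eq_zero]
      intro x hx
      have := ha x hx
      simp; omega
    rcases i with _ | i
    · by_cases hap : a < p
      · simp [hap]
      · simp [hap, hz hap]
    · have h' : i < t.length := by simpa using h
      by_cases hap : a < p
      · rw [List.getElem_cons_succ, ih ht i h', List.countP_cons]
        have : (decide (a < p)) = true := by simpa using hap
        rw [this]
        simp only [if_true]
        omega
      · simp only [List.getElem_cons_succ, List.countP_cons, hap, decide_false, hz hap]
        have : ¬ t[i] < p := by
          have := ha t[i] (List.getElem_mem h')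
          omega
        simp [this]

lemma countP_lt_succ (dead : List Nat) (p : Nat) (hnd : dead.Nodup) :
    dead.countP (fun d => decide (d < p+1))
      = dead.countP (fun d => decide (d < p)) + (if p ∈ dead then 1 else 0) := by
  induction dead with
  | nil => simp
  | cons d ds ih =>
    obtain ⟨hd, hds⟩ := List.nodup_cons.mp hnd
    by_cases hdp : d = p
    · subst hdp
      rw [List.countP_cons, List.countP_cons, ih hds]
      simp [hd]
    · simp only [List.countP_cons, ih hds, List.mem_cons]
      have : (p = d ∨ p ∈ ds) ↔ p ∈ ds := by constructor <;> [rintro (h|h); skip] <;> simp_all [eq_comm]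
      rw [if_congr this rfl rfl]
      split_ifs <;> simp_all <;> omega

lemma countP_range_mem (p : Nat) (dead : List Nat) (hnd : dead.Nodup) :
    (List.range p).countP (fun i => decide (i ∈ dead)) = dead.countP (fun d => decide (d < p)) := by
  induction p with
  | zero => simp
  | succ p ih =>
    rw [List.range_succ, List.countP_append, countP_lt_succ dead p hnd, ih]
    simp [List.countP_cons]

lemma countP_lt_le (p : Nat) (dead : List Nat) (hnd : dead.Nodup) :
    dead.countP (fun d => decide (d < p)) ≤ p := by
  rw [← countP_range_mem p dead hnd]
  calc (List.range p).countP _ ≤ (List.range p).length := List.countP_le_length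
  _ = p := List.length_range ..

lemma self_eq_range_map (l : List Int) : l = (List.range l.length).map (fun i => l.getD i 0) := by
  apply List.ext_getElem (by simp)
  intro i h1 h2
  simp [List.getD, List.getElem?_eq_getElem h1]

lemma bsCount_eq (dead : List Nat) (p : Nat) (hs : dead.Pairwise (· < ·)) :
    ∀ k lo hi, hi - lo = k →
      lo ≤ dead.countP (fun d => decide (d < p)) →
      dead.countP (fun d => decide (d < p)) ≤ hi → hi ≤ dead.length →
      bsCount dead p lo hi = dead.countP (fun d => decide (d < p)) := by
  intro k
  induction k using Nat.strong_induction_on with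
  | _ k ih =>
    intro lo hi hk hlo hhi hlen
    rw [bsCount]
    by_cases h : lo < hi
    · rw [dif_pos h]
      have hmidlt : (lo + hi) / 2 < hi := by omega
      have hmidge : lo ≤ (lo + hi) / 2 := by omega
      have hmlen : (lo + hi) / 2 < dead.length := by omega
      change (if dead.getD ((lo + hi) / 2) 0 < p then bsCount dead p ((lo + hi) / 2 + 1) hi
        else bsCount dead p lo ((lo + hi) / 2)) = _
      rw [List.getD_eq_getElem dead 0 hmlen]
      by_cases hd : dead[(lo + hi) / 2] < p
      · rw [if_pos hd]
        have hc : (lo + hi) / 2 < dead.countP (fun d => decide (d < p)) :=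
          (cnt_lt dead p hs _ hmlen).mp hd
        exact ih (hi - ((lo + hi) / 2 + 1)) (by omega) _ _ rfl (by omega) hhi hlen
      · rw [if_neg hd]
        have hc : dead.countP (fun d => decide (d < p)) ≤ (lo + hi) / 2 := by
          by_contra hcc
          exact hd ((cnt_lt dead p hs _ hmlen).mpr (by omega))
        exact ih ((lo + hi) / 2 - lo) (by omega) _ _ rfl hlo hc (by omega)
    · rw [dif_neg h]
      omega

lemma index?_map_none (l : List Nat) (f : Nat → Int) (x : Int)
    (h : l.filter (fun i => f i == x) = []) : PySem.List.index? (l.map f) x = none := by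
  rw [PySem.List.index?_eq_none_iff]
  intro hx
  obtain ⟨i, hi, hfi⟩ := List.mem_map.mp hx
  have := List.filter_eq_nil_iff.mp h i hi
  simp [hfi] at this

lemma index?_map_head (l : List Nat) (f : Nat → Int) (x : Int) (p : Nat) (rest : List Nat) :
    l.Pairwise (· < ·) → l.filter (fun i => f i == x) = p :: rest →
    PySem.List.index? (l.map f) x = some (l.countP (fun i => decide (i < p))) ∧
    (l.map f).eraseIdx (l.countP (fun i => decide (i < p)))
      = (l.filter (fun i => !(i == p))).map f := by
  induction l generalizing p rest with
  | nil => intro _ h; simp at h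
  | cons a t ih =>
    intro hl h
    obtain ⟨ha, ht⟩ := List.pairwise_cons.mp hl
    by_cases hax : f a == x
    · rw [List.filter_cons, if_pos hax] at h
      obtain ⟨rfl, rfl⟩ : a = p ∧ t.filter (fun i => f i == x) = rest := by
        constructor <;> [exact (List.cons.injEq .. ▸ h).1; exact (List.cons.injEq .. ▸ h).2]
      have hc : (a :: t).countP (fun i => decide (i < a)) = 0 := by
        rw [List.countP_eq_zero]
        intro i hi
        rcases List.mem_cons.mp hi with rfl | hi
        · simp
        · have := ha i hi; simp; omega
      refine ⟨?_, ?_⟩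
      · rw [hc, List.map_cons, (eq_of_beq hax ▸ rfl : f a = x)]
        exact PySem.List.index?_cons_self ..
      · rw [hc, List.map_cons, List.eraseIdx_cons_zero, List.filter_cons_of_neg (by simp)]
        have : t.filter (fun i => !(i == a)) = t := by
          rw [List.filter_eq_self]
          intro i hi
          have := ha i hi; simp; omega
        rw [this]
    · rw [List.filter_cons, if_neg hax] at h
      have hpt : p ∈ t := by
        have : p ∈ t.filter (fun i => f i == x) := h ▸ List.mem_cons_self ..
        exact (List.mem_filter.mp this).1
      have hap : a < p := ha p hpt
      obtain ⟨ih1, ih2⟩ := ih p rest ht h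
      have hc : (a :: t).countP (fun i => decide (i < p))
          = t.countP (fun i => decide (i < p)) + 1 := by
        rw [List.countP_cons]
        simp [hap]
      have hfa : ¬ (f a = x) := by simpa using hax
      refine ⟨?_, ?_⟩
      · rw [List.map_cons, PySem.List.index?_cons_of_ne (List.map f t) (fun hh => hfa hh), ih1, hc]
        rfl
      · rw [hc, List.map_cons, List.eraseIdx_cons_succ, ih2,
            List.filter_cons_of_pos (by simp; omega), List.map_cons]

def aliveIdx (n : Nat) (dead : List Nat) : List Nat :=
  (List.range n).filter (fun i => !(decide (i ∈ dead)))

lemma countP_not_add (l : List Nat) (q : Nat → Bool) :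
    l.countP (fun a => !(q a)) + l.countP q = l.length := by
  induction l with
  | nil => simp
  | cons a t ih =>
    rw [List.countP_cons, List.countP_cons]
    cases hq : q a <;> simp [hq] <;> omega

lemma countP_alive (n p : Nat) (dead : List Nat) (hnd : dead.Nodup) (hp : p ≤ n) :
    (aliveIdx n dead).countP (fun i => decide (i < p))
      = p - dead.countP (fun d => decide (d < p)) := by
  unfold aliveIdx
  rw [List.countP_filter]
  have hsplit : n = p + (n - p) := by omega
  rw [hsplit, List.range_add, List.countP_append]
  have h2 : ((List.range (n - p)).map (p + ·)).countP
      (fun a => decide (a < p) && !(decide (a ∈ dead))) = 0 := by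
    rw [List.countP_map, List.countP_eq_zero]
    intro i _
    simp
  have h1 : (List.range p).countP (fun a => decide (a < p) && !(decide (a ∈ dead)))
      = (List.range p).countP (fun a => !(decide (a ∈ dead))) := by
    apply List.countP_congr
    intro i hi
    have : i < p := List.mem_range.mp hi
    simp [this]
  rw [h1, h2, ← countP_range_mem p dead hnd]
  have hadd := countP_not_add (List.range p) (fun a => decide (a ∈ dead))
  rw [List.length_range] at hadd
  omega

lemma alive_sorted (n : Nat) (dead : List Nat) : (aliveIdx n dead).Pairwise (· < ·) :=
  (List.pairwise_lt_range).filter _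

lemma alive_nodup (n : Nat) (dead : List Nat) : (aliveIdx n dead).Nodup :=
  (List.nodup_range).filter _

lemma alive_lt (n : Nat) (dead : List Nat) : ∀ i ∈ aliveIdx n dead, i < n := by
  intro i hi
  exact List.mem_range.mp (List.mem_filter.mp hi).1

lemma alive_not_dead (n : Nat) (dead : List Nat) : ∀ i ∈ aliveIdx n dead, i ∉ dead := by
  intro i hi
  have := (List.mem_filter.mp hi).2
  simpa using this

lemma mem_pyInsert (dead : List Nat) (lo p : Nat) (hlo : lo ≤ dead.length) :
    ∀ i, i ∈ PySem.List.insert dead (lo : Int) p ↔ i ∈ dead ∨ i = p := by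
  intro i
  rw [PySem.List.insert_natCast dead lo p hlo]
  constructor
  · intro h
    rcases List.mem_append.mp h with h | h
    · exact Or.inl (List.mem_of_mem_take h)
    · rcases List.mem_cons.mp h with rfl | h
      · exact Or.inr rfl
      · exact Or.inl (List.mem_of_mem_drop h)
  · intro h
    rcases h with h | rfl
    · rcases List.mem_append.mp ((List.take_append_drop lo dead) ▸ h) with h | h
      · exact List.mem_append.mpr (Or.inl h)
      · exact List.mem_append.mpr (Or.inr (List.mem_cons_of_mem _ h))
    · exact List.mem_append.mpr (Or.inr (List.mem_cons_self ..))

lemma aliveIdx_pyInsert (n : Nat) (dead : List Nat) (lo p : Nat) (hlo : lo ≤ dead.length) :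
    aliveIdx n (PySem.List.insert dead (lo : Int) p)
      = (aliveIdx n dead).filter (fun i => !(i == p)) := by
  unfold aliveIdx
  rw [List.filter_filter]
  apply List.filter_congr
  intro i _
  have hm := mem_pyInsert dead lo p hlo i
  by_cases h2 : i = p
  · subst h2
    have hin : i ∈ PySem.List.insert dead (lo : Int) i := hm.mpr (Or.inr rfl)
    simp [hin]
  · by_cases h1 : i ∈ dead
    · have hin : i ∈ PySem.List.insert dead (lo : Int) p := hm.mpr (Or.inl h1)
      simp [hin, h1]
    · have hout : i ∉ PySem.List.insert dead (lo : Int) p := fun hh => by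
        rcases hm.mp hh with h | h
        · exact h1 h
        · exact h2 h
      simp [hout, h1, h2]

lemma pairwise_pyInsert (dead : List Nat) (p : Nat) (hs : dead.Pairwise (· < ·))
    (hp : p ∉ dead) :
    (PySem.List.insert dead ((dead.countP (fun d => decide (d < p)) : Nat) : Int) p).Pairwise (· < ·) := by
  have hnd : dead.Nodup := hs.nodup
  have hlo : dead.countP (fun d => decide (d < p)) ≤ dead.length := List.countP_le_length
  rw [PySem.List.insert_natCast dead _ p hlo]
  set c := dead.countP (fun d => decide (d < p)) with hc
  have htake : ∀ a ∈ dead.take c, a < p := by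
    intro a ha
    obtain ⟨i, hi, rfl⟩ := List.getElem_of_mem ha
    have hic : i < c := by simp [List.length_take] at hi; omega
    have hilen : i < dead.length := by simp [List.length_take] at hi; omega
    rw [List.getElem_take]
    exact (cnt_lt dead p hs i hilen).mpr (by omega)
  have hdrop : ∀ b ∈ dead.drop c, p < b := by
    intro b hb
    obtain ⟨i, hi, rfl⟩ := List.getElem_of_mem hb
    rw [List.getElem_drop]
    have hilen : c + i < dead.length := by
      have := List.length_drop (l := dead) (i := c) ▸ hi; omega
    have hnlt : ¬ dead[c + i] < p := by
      rw [cnt_lt dead p hs _ hilen]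
      omega
    have hne : dead[c + i] ≠ p := fun hh => hp (hh ▸ List.getElem_mem hilen)
    omega
  rw [List.pairwise_append]
  refine ⟨hs.sublist (List.take_sublist ..), ?_, ?_⟩
  · rw [List.pairwise_cons]
    exact ⟨hdrop, hs.sublist (List.drop_sublist ..)⟩
  · intro a ha b hb
    rcases List.mem_cons.mp hb with rfl | hb
    · exact htake a ha
    · exact lt_trans (htake a ha) (hdrop b hb)

def fval (F : List Int) (i : Nat) : Int := F.getD i 0

def occSpec (F : List Int) (dead : List Nat) (x : Int) : List Nat :=
  (aliveIdx F.length dead).filter (fun i => fval F i == x)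

def buildSpec (F : List Int) (x : Int) : List Nat :=
  (List.range F.length).filter (fun i => fval F i == x)

lemma buildSpec_append (F0 : List Int) (a : Int) (x : Int) :
    buildSpec (F0 ++ [a]) x = buildSpec F0 x ++ (if a == x then [F0.length] else []) := by
  unfold buildSpec
  rw [List.length_append]
  simp only [List.length_cons, List.length_nil]
  rw [List.range_succ, List.filter_append]
  congr 1
  · apply List.filter_congr
    intro i hi
    have hilt : i < F0.length := List.mem_range.mp hi
    unfold fval
    rw [List.getD_append _ _ _ _ hilt]
  · unfold fval
    rw [List.filter_singleton]
    have : (F0 ++ [a]).getD F0.length 0 = a := by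
      rw [List.getD_append_right _ _ _ _ (le_refl _)]
      simp
    rw [this]
    cases hax : (a == x) <;> simp [hax]

lemma build_inv (banned : PySem.Set Int) :
    ∀ (rs : List Int) (d : PySem.Dict Int (List Nat)) (F0 : List Int),
      (∀ x, d.getD x [] = buildSpec F0 x) →
      (∀ x, (rs.foldl (buildStep banned) (d, F0.length)).1.getD x []
          = buildSpec (F0 ++ rs.filter (fun item => !(PySem.Set.contains banned item))) x) := by
  intro rs
  induction rs with
  | nil => intro d F0 hd x; simpa using hd x
  | cons a t ih =>
    intro d F0 hd x
    rw [List.foldl_cons]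
    by_cases hk : PySem.Set.contains banned a
    · have hk' : a ∈ banned := by simpa using hk
      have hstep : buildStep banned (d, F0.length) a = (d, F0.length) := by
        unfold buildStep; simp [hk']
      rw [hstep, List.filter_cons, if_neg (by simpa using hk)]
      exact ih d F0 hd x
    · have hstep : buildStep banned (d, F0.length) a
          = (PySem.Dict.modify d a [] (fun l => l ++ [F0.length]), F0.length + 1) := by
        have hk' : a ∉ banned := by simpa using hk
        unfold buildStep; simp [hk']
      have hd' : ∀ x, (PySem.Dict.modify d a [] (fun l => l ++ [F0.length])).getD x []
          = buildSpec (F0 ++ [a]) x := by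
        intro x
        rw [PySem.Dict.getD_modify, buildSpec_append]
        by_cases hx : x = a
        · rw [if_pos hx, hd a, hx, if_pos (by simp)]
        · rw [if_neg hx, hd x, if_neg (by simpa using (fun hh => hx hh.symm)), List.append_nil]
      have hlen : F0.length + 1 = (F0 ++ [a]).length := by simp
      rw [hstep, hlen]
      have := ih (PySem.Dict.modify d a [] (fun l => l ++ [F0.length])) (F0 ++ [a]) hd' x
      rw [List.filter_cons, if_pos (by simpa using hk)]
      rw [this, List.append_assoc]
      rfl

def InvAB (F : List Int) (rec : List Int) (occ : PySem.Dict Int (List Nat)) (dead : List Nat) : Prop :=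
  dead.Pairwise (· < ·) ∧
  (∀ d ∈ dead, d < F.length) ∧
  rec = (aliveIdx F.length dead).map (fval F) ∧
  (∀ x, occ.getD x [] = occSpec F dead x)

lemma loop_inv (F : List Int) :
    ∀ (ts : List Int) (rec : List Int) (occ : PySem.Dict Int (List Nat)) (dead : List Nat)
      (acc : List (Option Int)),
      InvAB F rec occ dead →
      (ts.foldl stepA (rec, acc)).2 = (ts.foldl stepB (occ, dead, acc)).2.2 := by
  intro ts
  induction ts with
  | nil => intro rec occ dead acc _; rfl
  | cons item t ih =>
    intro rec occ dead acc hinv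
    obtain ⟨hsorted, hbound, hrec, hocc⟩ := hinv
    rw [List.foldl_cons, List.foldl_cons]
    rcases hcase : occ.getD item [] with _ | ⟨p, rest⟩
    · -- item has no alive occurrence: both sides append none
      have hfilt : (aliveIdx F.length dead).filter (fun i => fval F i == item) = [] := by
        have := hocc item; rw [hcase] at this; exact this.symm
      have hidx : PySem.List.index? rec item = none := by
        rw [hrec]; exact index?_map_none _ _ _ hfilt
      have hA : stepA (rec, acc) item = (rec, acc ++ [none]) := by
        unfold stepA; rw [hidx]
      have hB : stepB (occ, dead, acc) item = (occ, dead, acc ++ [none]) := by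
        unfold stepB; rw [hcase]
      rw [hA, hB]
      exact ih rec occ dead (acc ++ [none]) ⟨hsorted, hbound, hrec, hocc⟩
    · -- hit
      have hnd : dead.Nodup := hsorted.nodup
      have hfilt : (aliveIdx F.length dead).filter (fun i => fval F i == item) = p :: rest := by
        have := hocc item; rw [hcase] at this; exact this.symm
      have hpmem : p ∈ (aliveIdx F.length dead).filter (fun i => fval F i == item) := by
        rw [hfilt]; exact List.mem_cons_self ..
      have hpal : p ∈ aliveIdx F.length dead := (List.mem_filter.mp hpmem).1
      have hfp : fval F p = item := by
        have := (List.mem_filter.mp hpmem).2; simpa using this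
      have hplt : p < F.length := alive_lt _ _ _ hpal
      have hpnd : p ∉ dead := alive_not_dead _ _ _ hpal
      have hfiltnd : ((aliveIdx F.length dead).filter (fun i => fval F i == item)).Nodup :=
        (alive_nodup _ _).filter _
      have hprest : p ∉ rest := by
        rw [hfilt] at hfiltnd
        exact (List.nodup_cons.mp hfiltnd).1
      obtain ⟨hidx, herase⟩ := index?_map_head (aliveIdx F.length dead) (fval F) item p rest
        (alive_sorted _ _) hfilt
      set c := (aliveIdx F.length dead).countP (fun i => decide (i < p)) with hcdef
      set lo := dead.countP (fun d => decide (d < p)) with hlodef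
      have hloLen : lo ≤ dead.length := List.countP_le_length
      have hloP : lo ≤ p := countP_lt_le p dead hnd
      have hcEq : c = p - lo := countP_alive F.length p dead hnd (le_of_lt hplt)
      have hbs : bsCount dead p 0 dead.length = lo :=
        bsCount_eq dead p hsorted (dead.length - 0) 0 dead.length rfl (Nat.zero_le _)
          List.countP_le_length le_rfl
      have hclen : c < (aliveIdx F.length dead).length := by
        obtain ⟨pre, suf, hxs, hlenpre, _⟩ := (PySem.List.index?_eq_some_iff _ _ c).mp hidx
        have hlen2 : (List.map (fval F) (aliveIdx F.length dead)).length
            = (aliveIdx F.length dead).length := by simp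
        rw [hxs] at hlen2
        simp at hlen2
        omega
      have hclen' : c < rec.length := by
        rw [hrec]; simpa using hclen
      have hA : stepA (rec, acc) item = (rec.eraseIdx c, acc ++ [some ((c : Int) + 1)]) := by
        have hidx' : PySem.List.index? rec item = some c := by rw [hrec]; exact hidx
        have hcast : ((c : Int) + 1 - 1) = ((c : Nat) : Int) := by ring
        have hpop : PySem.List.pop? rec ((c : Int) + 1 - 1) = some (rec[c], rec.eraseIdx c) := by
          rw [hcast, PySem.List.pop?_natCast _ c hclen']
        unfold stepA
        rw [hidx']
        dsimp only
        rw [hpop]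
      have hB : stepB (occ, dead, acc) item
          = (occ.insert item rest, PySem.List.insert dead (lo : Int) p,
             acc ++ [some ((p : Int) + 1 - (lo : Int))]) := by
        unfold stepB
        rw [hcase]
        simp only [hbs]
      have hval : ((c : Int) + 1) = (p : Int) + 1 - (lo : Int) := by
        omega
      set dead' := PySem.List.insert dead (lo : Int) p with hdead'
      have haliveI : aliveIdx F.length dead'
          = (aliveIdx F.length dead).filter (fun i => !(i == p)) :=
        aliveIdx_pyInsert F.length dead lo p hloLen
      have hinv' : InvAB F (rec.eraseIdx c) (occ.insert item rest) dead' := by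
        refine ⟨?_, ?_, ?_, ?_⟩
        · exact pairwise_pyInsert dead p hsorted hpnd
        · intro d hd
          rcases (mem_pyInsert dead lo p hloLen d).mp hd with h | rfl
          · exact hbound d h
          · exact hplt
        · rw [hrec, herase, haliveI]
        · intro x
          rw [PySem.Dict.getD_insert]
          unfold occSpec
          rw [haliveI, List.filter_filter]
          by_cases hx : x = item
          · subst hx
            rw [if_pos rfl]
            have : (aliveIdx F.length dead).filter (fun a => (fval F a == x) && !(a == p))
                = ((aliveIdx F.length dead).filter (fun i => fval F i == x)).filter
                    (fun a => !(a == p)) := by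
              rw [List.filter_filter]
              apply List.filter_congr
              intro i _
              rw [Bool.and_comm]
            rw [this, hfilt, List.filter_cons, if_neg (by simp)]
            rw [List.filter_eq_self.mpr]
            intro i hi
            simp
            exact fun hh => hprest (hh ▸ hi)
          · rw [if_neg hx, hocc x]
            unfold occSpec
            apply (List.filter_congr ?_).symm
            intro i hial
            have : fval F i == x → i ≠ p := by
              intro hfix rfl
              exact hx (by rw [← hfp]; exact (eq_of_beq hfix).symm)
            by_cases hfix : fval F i == x
            · simp [hfix, this hfix]
            · simp [hfix]
      rw [hA, hB, hval]
      exact ih _ _ _ _ hinv'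

-- ===== VERDICT (by name: the statement is the Claim_ definition above) =====
theorem compute_normalized_ranks_spec : Claim_equal_compute_normalized_ranks := by
  intro train test recommended _
  unfold Spec_compute_normalized_ranks compute_normalized_ranks compute_normalized_ranks_alt
  dsimp only
  set banned := PySem.Set.ofList train with hbanned
  set F := recommended.filter (fun item => !(PySem.Set.contains banned item)) with hF
  have hbuild := build_inv banned recommended PySem.Dict.empty []
    (fun x => by simp [buildSpec, PySem.Dict.getD_empty])
  have halive : aliveIdx F.length [] = List.range F.length := by
    unfold aliveIdx; simp
  have hrec0 : F = (aliveIdx F.length []).map (fval F) := by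
    rw [halive]
    unfold fval
    exact self_eq_range_map F
  have hinv : InvAB F F ((recommended.foldl (buildStep banned) (PySem.Dict.empty, 0)).1) [] := by
    refine ⟨List.Pairwise.nil, by simp, hrec0, ?_⟩
    intro x
    have hx := hbuild x
    unfold occSpec
    rw [halive]
    rw [List.nil_append] at hx
    unfold buildSpec at hx
    exact hx
  exact loop_inv F test F _ [] [] hinv
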